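-- pv_equiv track=rewrite | github.com/moyasui/Quanthon | Quanthon/mappers_utils.py | gen_prod_3u
-- ===== SOURCE A (Python) =====
-- def gen_prod_3u(ops):
--     """
--     Generate products of creation and annihilation operators in the given order.
--
--     args:
--         ops: list of length 3, consists of creation and annihilation operators depending on the order
--         of their indices.
--
--     return:
--         list of strings, each string is a term of the product
--     """
--
--     op1, op2, op3 = ops
--     products = []
--
--     for t1, factor_1 in op1:
--         for t2, factor_2 in op2:
--             for t3, factor_3 in op3:
--                 op = t1 + t2 + t3
--                 factor = factor_1 * factor_2 * factor_3
--                 products.append((op, factor))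
--
--     return products
-- ===== SOURCE B (Python) =====
-- def gen_prod_3u(ops):
--     op1, op2, op3 = ops
--     op12 = [(t1 + t2, f1 * f2) for t1, f1 in op1 for t2, f2 in op2]
--     return [(t12 + t3, f12 * f3) for t12, f12 in op12 for t3, f3 in op3]
-- ===== Notes on version B (the rewrite author's own statement) =====
-- stated objective: alternative
-- what changed: Replaces the single triple-nested append loop by two comprehension passes that first materialize the pairwise product op1xop2 and then combine it with op3, yielding the identical list in identical order.
import Mathlib
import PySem

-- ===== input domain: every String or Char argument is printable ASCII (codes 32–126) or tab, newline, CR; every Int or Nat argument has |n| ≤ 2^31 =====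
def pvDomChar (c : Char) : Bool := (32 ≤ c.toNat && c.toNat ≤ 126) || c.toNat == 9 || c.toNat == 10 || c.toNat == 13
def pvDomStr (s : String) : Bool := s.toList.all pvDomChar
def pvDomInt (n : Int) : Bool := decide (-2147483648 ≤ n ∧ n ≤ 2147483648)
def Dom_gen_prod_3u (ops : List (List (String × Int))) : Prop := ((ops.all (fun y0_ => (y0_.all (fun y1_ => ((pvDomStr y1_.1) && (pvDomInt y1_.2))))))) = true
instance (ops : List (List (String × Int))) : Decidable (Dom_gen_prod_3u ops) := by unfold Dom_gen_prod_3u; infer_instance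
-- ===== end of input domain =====

-- B replaces A's triple-nested append loop by two flatMap passes via an intermediate pairwise product; same output order.


-- ===== PORT A =====
-- A: triple nested for-loop appending one tuple at a time.
def gen_prod_3u (ops : List (List (String × Int))) : List (String × Int) :=
  match ops with
  | [op1, op2, op3] =>
    op1.foldl (fun acc p1 =>
      op2.foldl (fun acc p2 =>
        op3.foldl (fun acc p3 =>
          acc ++ [(p1.1 ++ p2.1 ++ p3.1, p1.2 * p2.2 * p3.2)]) acc) acc) []
  | _ => []  -- unreachable under Pre_ (Python raises on unpacking)

-- ===== PORT B =====
-- B: two comprehension passes through the intermediate pairwise product.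
def gen_prod_3u_alt (ops : List (List (String × Int))) : List (String × Int) :=
  -- unpacking 'op1, op2, op3 = ops' rendered as a length guard plus indexed access
  if ops.length = 3 then
    let op1 := ops.getD 0 []
    let op2 := ops.getD 1 []
    let op3 := ops.getD 2 []
    let op12 := op1.flatMap (fun p1 => op2.map (fun p2 => (p1.1 ++ p2.1, p1.2 * p2.2)))
    op12.flatMap (fun p12 => op3.map (fun p3 => (p12.1 ++ p3.1, p12.2 * p3.2)))
  else []  -- unreachable under Pre_ (Python raises on unpacking)

-- ===== PRECONDITION & SPEC =====
-- Pre_ excludes lists not of length 3, where the Python unpacking 'op1, op2, op3 = ops' raises ValueError.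
def Pre_gen_prod_3u (ops : List (List (String × Int))) : Prop := ops.length = 3
instance (ops : List (List (String × Int))) : Decidable (Pre_gen_prod_3u ops) := by unfold Pre_gen_prod_3u; infer_instance
def pvWitness_gen_prod_3u : (List (List (String × Int))) := [[("a", 2)], [("b", 3)], [("c", 5)]]

def Spec_gen_prod_3u (ops : List (List (String × Int))) (out : List (String × Int)) : Prop := out = gen_prod_3u_alt ops
instance (ops : List (List (String × Int))) (out : List (String × Int)) : Decidable (Spec_gen_prod_3u ops out) := by unfold Spec_gen_prod_3u; infer_instance

-- ===== CLAIM (what is proved, stated in full; the proofs are below) =====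
def Claim_equal_gen_prod_3u : Prop := ∀ (ops : List (List (String × Int))), Dom_gen_prod_3u ops → Pre_gen_prod_3u ops → Spec_gen_prod_3u ops (gen_prod_3u ops)

-- ===== LEMMAS AND PROOFS =====

-- inner two loops of A, over a fixed first pair p1, equal B's second pass restricted to that p1's row
theorem inner_two (op2 op3 : List (String × Int)) (p1 : String × Int) (acc : List (String × Int)) :
    op2.foldl (fun acc p2 =>
      op3.foldl (fun acc p3 =>
        acc ++ [(p1.1 ++ p2.1 ++ p3.1, p1.2 * p2.2 * p3.2)]) acc) acc
    = acc ++ (op2.map (fun p2 => (p1.1 ++ p2.1, p1.2 * p2.2))).flatMap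
        (fun p12 => op3.map (fun p3 => (p12.1 ++ p3.1, p12.2 * p3.2))) := by
  induction op2 generalizing acc with
  | nil => simp
  | cons p2 rest ih =>
    rw [List.foldl_cons, List.map_cons, List.flatMap_cons, ih,
        PySem.List.foldl_append_singleton_eq_map, List.append_assoc]

-- the outer loop equals B's flatMap over the fused per-p1 blocks
theorem outer_loop (op2 op3 : List (String × Int)) (op1 acc : List (String × Int)) :
    op1.foldl (fun acc p1 =>
      op2.foldl (fun acc p2 =>
        op3.foldl (fun acc p3 =>
          acc ++ [(p1.1 ++ p2.1 ++ p3.1, p1.2 * p2.2 * p3.2)]) acc) acc) acc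
    = acc ++ op1.flatMap (fun p1 =>
        (op2.map (fun p2 => (p1.1 ++ p2.1, p1.2 * p2.2))).flatMap
          (fun p12 => op3.map (fun p3 => (p12.1 ++ p3.1, p12.2 * p3.2)))) := by
  induction op1 generalizing acc with
  | nil => simp
  | cons p1 rest ih =>
    rw [List.foldl_cons, inner_two, ih, List.flatMap_cons, List.append_assoc]

-- ===== VERDICT (by name: the statement is the Claim_ definition above) =====
theorem gen_prod_3u_spec : Claim_equal_gen_prod_3u := by
  intro ops _ hpre
  match ops with
  | [] | [_] | [_, _] | _ :: _ :: _ :: _ :: _ => simp [Pre_gen_prod_3u] at hpre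
  | [op1, op2, op3] =>
    show gen_prod_3u [op1, op2, op3] = gen_prod_3u_alt [op1, op2, op3]
    simp only [gen_prod_3u, gen_prod_3u_alt, List.length_cons, List.length_nil, if_pos rfl,
      List.getD, List.getElem?_cons_zero, List.getElem?_cons_succ, Option.getD_some, if_true]
    rw [outer_loop, List.flatMap_assoc, List.nil_append]
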